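-- pv_equiv track=rewrite | github.com/Adam-Hammo/advent-of-code | 2019-intcode/17.py | make_scaffold
-- ===== SOURCE A (Python) =====
-- def make_scaffold(computer):
--     scaffold = {}
--     x, y = 0, 0
--     for output in computer:
--         c = chr(output)
--         if c == "\n":
--             if not x:
--                 break
--             y += 1
--             x = 0
--         else:
--             scaffold[(x, y)] = c
--             x += 1
--
--     return scaffold
-- ===== SOURCE B (Python) =====
-- def make_scaffold(computer):
--     it = iter(computer)
--     rows = []
--     cur = ""
--     for output in it:
--         c = chr(output)
--         if c == "\n":
--             if not cur:
--                 break
--             rows.append(cur)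
--             cur = ""
--         else:
--             cur += c
--     if cur:
--         rows.append(cur)
--     return {(x, y): c for y, row in enumerate(rows) for x, c in enumerate(row)}
-- ===== Notes on version B (the rewrite author's own statement) =====
-- stated objective: alternative
-- what changed: B splits the work into two phases: it first consumes the stream into a list of row strings (stopping at the first blank line, keeping an unterminated final row), then builds the coordinate dict in a single nested comprehension, instead of A's one fused loop maintaining x/y counters and the dict together.
-- outside the precondition, e.g. on make_scaffold([10, -1]): A returns {}, B returns {}; on make_scaffold([10, 55296]): A returns {}, B returns {}
import Mathlib
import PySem

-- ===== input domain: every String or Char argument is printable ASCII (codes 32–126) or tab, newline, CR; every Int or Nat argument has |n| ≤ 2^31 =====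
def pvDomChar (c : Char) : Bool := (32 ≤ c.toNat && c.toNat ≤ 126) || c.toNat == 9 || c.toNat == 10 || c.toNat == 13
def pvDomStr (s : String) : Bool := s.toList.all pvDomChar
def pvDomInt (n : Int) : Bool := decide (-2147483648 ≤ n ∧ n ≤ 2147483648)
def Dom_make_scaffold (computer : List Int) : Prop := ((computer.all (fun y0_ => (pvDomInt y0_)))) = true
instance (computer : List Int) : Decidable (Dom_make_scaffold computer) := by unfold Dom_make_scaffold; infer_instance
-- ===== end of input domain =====

-- B restructures A's fused scanning loop into two phases: collect row strings (stopping at the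
-- first blank line, keeping an unterminated final row), then flatten them with nested enumerate.


-- chr(o) as a one-character Lean string (exact for codes admitted by Pre_make_scaffold)
def pvChr (o : Int) : String := String.ofList [Char.ofNat o.toNat]

-- ===== PORT A =====
-- A's loop: dict scaffold, counters x,y; break on a newline at x = 0.
def pvGoA : List Int → List (Int × Int × String) → Int → Int → List (Int × Int × String)
  | [], scaffold, _, _ => scaffold
  | o :: rest, scaffold, x, y =>
    if o = 10 then
      if x = 0 then scaffold
      else pvGoA rest scaffold 0 (y + 1)
    else pvGoA rest (scaffold ++ [(x, y, pvChr o)]) (x + 1) y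

def make_scaffold (computer : List Int) : List (Int × Int × String) :=
  pvGoA computer [] 0 0

-- ===== PORT B =====
-- phase 1 of Source B: consume the stream into row strings (as List Char rows);
-- break on a newline with an empty current row; keep a non-empty unterminated final row.
def pvRowsB : List Int → List (List Char) → List Char → List (List Char)
  | [], rows, cur => if cur.isEmpty then rows else rows ++ [cur]
  | o :: rest, rows, cur =>
    if o = 10 then
      if cur.isEmpty then rows
      else pvRowsB rest (rows ++ [cur]) []
    else pvRowsB rest rows (cur ++ [Char.ofNat o.toNat])

-- phase 2 of Source B: {(x,y): c for y,row in enumerate(rows) for x,c in enumerate(row)}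
def make_scaffold_alt (computer : List Int) : List (Int × Int × String) :=
  (PySem.List.enumerate (pvRowsB computer [] [])).flatMap
    (fun yr => (PySem.List.enumerate yr.2).map (fun xc => (xc.1, yr.1, String.ofList [xc.2])))

-- ===== PRECONDITION & SPEC =====
-- Pre_ excludes codes on which chr raises ValueError (negative or > 0x10FFFF) and, as a stated
-- narrowing, surrogate codes 0xD800–0xDFFF: Python's chr returns a lone-surrogate str there,
-- which is not representable as a Lean Char/String (A may also return on such inputs when it
-- breaks early; both programs agree there — see the cites in claim.json).
def Pre_make_scaffold (computer : List Int) : Prop :=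
  ∀ o ∈ computer, 0 ≤ o ∧ (o < 55296 ∨ (57343 < o ∧ o ≤ 1114111))
instance (computer : List Int) : Decidable (Pre_make_scaffold computer) := by
  unfold Pre_make_scaffold; infer_instance

def pvWitness_make_scaffold : List Int := [35, 35, 10, 46, 35, 10, 10, 99]

def Spec_make_scaffold (computer : List Int) (out : List (Int × Int × String)) : Prop :=
  out = make_scaffold_alt computer
instance (computer : List Int) (out : List (Int × Int × String)) : Decidable (Spec_make_scaffold computer out) := by
  unfold Spec_make_scaffold; infer_instance

-- ===== CLAIM (what is proved, stated in full; the proofs are below) =====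
def Claim_equal_make_scaffold : Prop :=
  ∀ (computer : List Int), Dom_make_scaffold computer → Pre_make_scaffold computer →
    Spec_make_scaffold computer (make_scaffold computer)

-- ===== LEMMAS AND PROOFS =====

-- flatten of one row, placed at row index y (phase 2 of B restricted to one row)
def pvFlatRow (y : Int) (row : List Char) : List (Int × Int × String) :=
  (PySem.List.enumerate row).map (fun xc => (xc.1, y, String.ofList [xc.2]))

-- phase 2 of B, with an arbitrary starting row index
def pvFlatAll (s : Int) (rows : List (List Char)) : List (Int × Int × String) :=
  (PySem.List.enumerate rows s).flatMap (fun yr => pvFlatRow yr.1 yr.2)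

theorem pvFlatRow_append_singleton (y : Int) (row : List Char) (c : Char) :
    pvFlatRow y (row ++ [c]) = pvFlatRow y row ++ [((row.length : Int), y, String.ofList [c])] := by
  simp [pvFlatRow, PySem.List.enumerate_append, PySem.List.enumerate_cons,
    PySem.List.enumerate_nil]

theorem pvFlatAll_append_singleton (s : Int) (rows : List (List Char)) (row : List Char) :
    pvFlatAll s (rows ++ [row]) = pvFlatAll s rows ++ pvFlatRow (s + rows.length) row := by
  simp [pvFlatAll, PySem.List.enumerate_append, PySem.List.enumerate_cons,
    PySem.List.enumerate_nil]

-- the loop invariant tying A's fused loop to B's two phases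
theorem pvGoA_eq_flat (rest : List Int) (rows : List (List Char)) (cur : List Char) :
    pvGoA rest (pvFlatAll 0 rows ++ pvFlatRow rows.length cur) (cur.length : Int) (rows.length : Int)
      = pvFlatAll 0 (pvRowsB rest rows cur) := by
  induction rest generalizing rows cur with
  | nil =>
    by_cases h : cur.isEmpty
    · simp [pvGoA, pvRowsB, List.isEmpty_iff.mp h, pvFlatRow, PySem.List.enumerate_nil]
    · simp [pvGoA, pvRowsB, h, pvFlatAll_append_singleton]
  | cons o rest ih =>
    by_cases ho : o = 10
    · by_cases h : cur.isEmpty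
      · have hc : cur = [] := List.isEmpty_iff.mp h
        simp [pvGoA, pvRowsB, ho, hc, pvFlatRow, PySem.List.enumerate_nil]
      · have hc : cur ≠ [] := by simpa [List.isEmpty_iff] using h
        have := ih (rows ++ [cur]) []
        simp only [pvFlatRow, PySem.List.enumerate_nil, List.map_nil, List.append_nil,
          List.length_nil, Nat.cast_zero, List.length_append, List.length_cons,
          Nat.cast_add, Nat.cast_one] at this
        simpa [pvGoA, pvRowsB, ho, hc, pvFlatAll_append_singleton] using this
    · have := ih rows (cur ++ [Char.ofNat o.toNat])
      simp only [List.length_append, List.length_cons, List.length_nil, Nat.cast_add,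
        Nat.cast_one, Nat.cast_zero, pvFlatRow_append_singleton] at this
      simpa [pvGoA, pvRowsB, ho, pvChr, List.append_assoc] using this

-- ===== VERDICT (by name: the statement is the Claim_ definition above) =====
theorem make_scaffold_spec : Claim_equal_make_scaffold := by
  intro computer _ _
  unfold Spec_make_scaffold make_scaffold make_scaffold_alt
  have := pvGoA_eq_flat computer [] []
  simpa [pvFlatAll, pvFlatRow, PySem.List.enumerate_nil] using this
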